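-- pv_equiv track=rewrite | github.com/johansen23213/invest_value_manager | tools/ownership_cache.py | get_insider_sentiment
-- ===== SOURCE A (Python) =====
-- def get_insider_sentiment(ownership_data, ticker):
--     """Get insider sentiment summary for a ticker.
--
--     Returns: (buys, sells, buybacks, options, net, signal)
--     """
--     data = ownership_data.get(ticker, {})
--     insiders = data.get('insiders', [])
--     buys = sum(1 for i in insiders if i.get('type') == 'BUY')
--     sells = sum(1 for i in insiders if i.get('type') == 'SELL')
--     buybacks = sum(1 for i in insiders if i.get('type') == 'BUYBACK')
--     options = sum(1 for i in insiders if i.get('type') == 'OPTION')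
--     net = buys - sells
--
--     if buys > 0 and net > 0:
--         signal = 'BULLISH'
--     elif net == 0 and buybacks > 0:
--         signal = 'BB+'
--     elif net == 0 or not insiders:
--         signal = 'NEUTRAL'
--     elif net >= -2:
--         signal = 'CAUTIOUS'
--     else:
--         signal = 'BEARISH'
--
--     return buys, sells, buybacks, options, net, signal
-- ===== SOURCE B (Python) =====
-- def get_insider_sentiment(ownership_data, ticker):
--     """Get insider sentiment summary for a ticker.
--
--     Returns: (buys, sells, buybacks, options, net, sig)
--     """
--     insiders = ownership_data.get(ticker, {}).get('insiders', [])
--     slot = {'BUY': 0, 'SELL': 1, 'BUYBACK': 2, 'OPTION': 3}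
--     counts = [0, 0, 0, 0]
--     for i in insiders:
--         k = slot.get(i.get('type'))
--         if k is not None:
--             counts[k] += 1
--     buys, sells, buybacks, options = counts
--     net = buys - sells
--     # net > 0 already implies buys > 0, and an empty insiders list gives
--     # net == 0, so the sign of net alone drives the decision.
--     if net > 0:
--         sig = 'BULLISH'
--     elif net == 0:
--         sig = 'BB+' if buybacks > 0 else 'NEUTRAL'
--     elif net >= -2:
--         sig = 'CAUTIOUS'
--     else:
--         sig = 'BEARISH'
--     return buys, sells, buybacks, options, net, sig
-- ===== Notes on version B (the rewrite author's own statement) =====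
-- stated objective: alternative
-- what changed: B replaces A's four separate scans with one dispatch-table pass that increments a 4-slot array, and replaces A's five-way guard chain by a sign trichotomy on net after proving the 'buys > 0' conjunct and the empty-list check redundant.
import Mathlib
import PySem

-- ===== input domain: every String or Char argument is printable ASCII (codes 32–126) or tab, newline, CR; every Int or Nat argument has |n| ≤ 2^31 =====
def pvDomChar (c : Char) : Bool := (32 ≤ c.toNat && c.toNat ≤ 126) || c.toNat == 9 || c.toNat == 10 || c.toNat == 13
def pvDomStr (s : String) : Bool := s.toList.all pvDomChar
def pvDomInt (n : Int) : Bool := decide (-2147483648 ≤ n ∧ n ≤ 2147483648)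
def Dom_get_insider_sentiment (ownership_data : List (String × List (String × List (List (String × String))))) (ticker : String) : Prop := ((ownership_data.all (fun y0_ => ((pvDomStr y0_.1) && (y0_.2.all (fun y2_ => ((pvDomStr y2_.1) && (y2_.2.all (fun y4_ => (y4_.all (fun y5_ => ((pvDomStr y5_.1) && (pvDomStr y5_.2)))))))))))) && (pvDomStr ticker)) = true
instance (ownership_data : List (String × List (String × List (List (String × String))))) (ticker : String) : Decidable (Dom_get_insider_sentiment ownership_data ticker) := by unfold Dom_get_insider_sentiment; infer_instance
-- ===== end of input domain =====

-- B makes one dispatch-table pass into a 4-slot array instead of A's four scans, and drives the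
-- signal by a sign trichotomy on net (the 'buys > 0' conjunct and the empty-list check are redundant).

-- ===== PORT A =====
-- i.get('type') on an insider dict (association list)
def pvTypeOf (i : List (String × String)) : Option String := (PySem.Dict.mk i).get? "type"

def get_insider_sentiment (ownership_data : List (String × List (String × List (List (String × String))))) (ticker : String) : Int × Int × Int × Int × Int × String :=
  let data := (PySem.Dict.mk ownership_data).getD ticker []
  let insiders := (PySem.Dict.mk data).getD "insiders" []
  let buys : Int := insiders.foldl (fun n i => if pvTypeOf i == some "BUY" then n + 1 else n) 0
  let sells : Int := insiders.foldl (fun n i => if pvTypeOf i == some "SELL" then n + 1 else n) 0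
  let buybacks : Int := insiders.foldl (fun n i => if pvTypeOf i == some "BUYBACK" then n + 1 else n) 0
  let options : Int := insiders.foldl (fun n i => if pvTypeOf i == some "OPTION" then n + 1 else n) 0
  let net := buys - sells
  let signal :=
    if buys > 0 ∧ net > 0 then "BULLISH"
    else if net = 0 ∧ buybacks > 0 then "BB+"
    else if net = 0 ∨ insiders = [] then "NEUTRAL"
    else if net ≥ -2 then "CAUTIOUS"
    else "BEARISH"
  (buys, sells, buybacks, options, net, signal)

-- ===== PORT B =====
-- the dispatch table: slot = {'BUY': 0, 'SELL': 1, 'BUYBACK': 2, 'OPTION': 3}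
def pvSlot : PySem.Dict String Int := PySem.Dict.mk [("BUY", 0), ("SELL", 1), ("BUYBACK", 2), ("OPTION", 3)]
-- slot.get(t) where t : Optional[str]; None is never a key of slot, so slot.get(None) is None
def pvSlotGet (t : Option String) : Option Int :=
  match t with
  | some s => pvSlot.get? s
  | none => none
-- the loop body: k = slot.get(i.get('type')); if k is not None: counts[k] += 1
def pvStep (c : List Int) (i : List (String × String)) : List Int :=
  match pvSlotGet (pvTypeOf i) with
  | some k => PySem.List.pySetD c k (PySem.List.pyGetD c k 0 + 1)
  | none => c

def get_insider_sentiment_alt (ownership_data : List (String × List (String × List (List (String × String))))) (ticker : String) : Int × Int × Int × Int × Int × String :=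
  let insiders := (PySem.Dict.mk ((PySem.Dict.mk ownership_data).getD ticker [])).getD "insiders" []
  let counts : List Int := insiders.foldl pvStep [0, 0, 0, 0]
  -- buys, sells, buybacks, options = counts  (counts always has length 4)
  let buys := counts.getD 0 0
  let sells := counts.getD 1 0
  let buybacks := counts.getD 2 0
  let options := counts.getD 3 0
  let net := buys - sells
  let signal :=
    if net > 0 then "BULLISH"
    else if net = 0 then (if buybacks > 0 then "BB+" else "NEUTRAL")
    else if net ≥ -2 then "CAUTIOUS"
    else "BEARISH"
  (buys, sells, buybacks, options, net, signal)

-- ===== PRECONDITION & SPEC =====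
def Spec_get_insider_sentiment (ownership_data : List (String × List (String × List (List (String × String))))) (ticker : String) (out : Int × Int × Int × Int × Int × String) : Prop := out = get_insider_sentiment_alt ownership_data ticker
instance (ownership_data : List (String × List (String × List (List (String × String))))) (ticker : String) (out : Int × Int × Int × Int × Int × String) : Decidable (Spec_get_insider_sentiment ownership_data ticker out) := by unfold Spec_get_insider_sentiment; infer_instance

-- ===== CLAIM =====
def Claim_equal_get_insider_sentiment : Prop := ∀ (ownership_data : List (String × List (String × List (List (String × String))))) (ticker : String), Dom_get_insider_sentiment ownership_data ticker → Spec_get_insider_sentiment ownership_data ticker (get_insider_sentiment ownership_data ticker)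

-- ===== LEMMAS AND PROOFS =====

-- B's dispatch loop fills the four slots with the four per-type counts.
theorem countsLoop (l : List (List (String × String))) (a b c d : Int) :
    l.foldl pvStep [a, b, c, d]
    = [a + ((l.map pvTypeOf).count (some "BUY") : Int),
       b + ((l.map pvTypeOf).count (some "SELL") : Int),
       c + ((l.map pvTypeOf).count (some "BUYBACK") : Int),
       d + ((l.map pvTypeOf).count (some "OPTION") : Int)] := by
  induction l generalizing a b c d with
  | nil => simp
  | cons x rest ih =>
    rw [List.foldl_cons]
    by_cases h1 : pvTypeOf x = some "BUY"
    · have hstep : pvStep [a, b, c, d] x = [a + 1, b, c, d] := by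
        unfold pvStep; rw [h1]; rfl
      rw [hstep, ih]; simp [h1]; omega
    by_cases h2 : pvTypeOf x = some "SELL"
    · have hstep : pvStep [a, b, c, d] x = [a, b + 1, c, d] := by
        unfold pvStep; rw [h2]; rfl
      rw [hstep, ih]; simp [h2]; omega
    by_cases h3 : pvTypeOf x = some "BUYBACK"
    · have hstep : pvStep [a, b, c, d] x = [a, b, c + 1, d] := by
        unfold pvStep; rw [h3]; rfl
      rw [hstep, ih]; simp [h3]; omega
    by_cases h4 : pvTypeOf x = some "OPTION"
    · have hstep : pvStep [a, b, c, d] x = [a, b, c, d + 1] := by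
        unfold pvStep; rw [h4]; rfl
      rw [hstep, ih]; simp [h4]; omega
    · have hstep : pvStep [a, b, c, d] x = [a, b, c, d] := by
        unfold pvStep
        rcases ht : pvTypeOf x with _ | s
        · rfl
        · rw [ht] at h1 h2 h3 h4
          have hs : pvSlot.get? s = none := by
            simp only [pvSlot, PySem.Dict.get?_mk_cons]
            have e1 : ("BUY" == s) = false := by
              simp only [beq_eq_false_iff_ne]; exact fun h => h1 (by rw [h])
            have e2 : ("SELL" == s) = false := by
              simp only [beq_eq_false_iff_ne]; exact fun h => h2 (by rw [h])
            have e3 : ("BUYBACK" == s) = false := by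
              simp only [beq_eq_false_iff_ne]; exact fun h => h3 (by rw [h])
            have e4 : ("OPTION" == s) = false := by
              simp only [beq_eq_false_iff_ne]; exact fun h => h4 (by rw [h])
            simp [e1, e2, e3, e4, PySem.Dict.get?]
          simp [pvSlotGet, hs]
      rw [hstep, ih]
      simp [List.count_cons]
      exact ⟨h1, h2, h3, h4⟩

-- A's per-type scan counts the occurrences of v among the mapped types.
theorem foldl_if_count (l : List (List (String × String))) (v : String) :
    l.foldl (fun n i => if pvTypeOf i == some v then n + 1 else n) (0 : Int)
      = ((l.map pvTypeOf).count (some v) : Int) := by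
  rw [PySem.List.foldl_if_add_one]
  simp [List.count_eq_countP, List.countP_map, Function.comp_def]

-- A's five-way guard chain equals B's sign trichotomy: net > 0 forces buys > 0, and an empty
-- insiders list forces net = 0, so the dropped conditions never change the branch taken.
theorem signal_eq (l : List (List (String × String))) (nB nS nBB : Nat)
    (h0 : l = [] → nB = 0 ∧ nS = 0) :
    (if (nB : Int) > 0 ∧ (nB : Int) - nS > 0 then "BULLISH"
     else if (nB : Int) - nS = 0 ∧ (nBB : Int) > 0 then "BB+"
     else if (nB : Int) - nS = 0 ∨ l = [] then "NEUTRAL"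
     else if (nB : Int) - nS ≥ -2 then "CAUTIOUS"
     else "BEARISH")
    = (if (nB : Int) - nS > 0 then "BULLISH"
       else if (nB : Int) - nS = 0 then (if (nBB : Int) > 0 then "BB+" else "NEUTRAL")
       else if (nB : Int) - nS ≥ -2 then "CAUTIOUS"
       else "BEARISH") := by
  by_cases hl : l = []
  · obtain ⟨hB, hS⟩ := h0 hl
    simp only [hl, or_true, hB, hS]
    split_ifs <;> first | rfl | omega
  · simp only [hl, or_false]
    split_ifs <;> first | rfl | omega

-- ===== VERDICT =====
theorem get_insider_sentiment_spec : Claim_equal_get_insider_sentiment := by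
  intro od tk _
  unfold Spec_get_insider_sentiment get_insider_sentiment get_insider_sentiment_alt
  simp only [foldl_if_count, countsLoop, zero_add, List.getD]
  simp only [List.getElem?_cons_zero, List.getElem?_cons_succ, Option.getD_some]
  rw [signal_eq _ _ _ _ (fun hl => by simp [hl])]
  rfl
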